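-- pv_equiv track=rewrite | github.com/ersincine/points-on-line | pytorch_exact_solution.py | to_bitarray
-- ===== SOURCE A (Python) =====
-- def to_bitarray(filtered_points: list[set[int]], point_count: int) -> list[list[bool]]:
--     return [
--         [
--             True if point_idx in filtered_points[line_idx] else False
--             for point_idx in range(point_count)
--         ]
--         for line_idx in range(len(filtered_points))
--     ]
-- ===== SOURCE B (Python) =====
-- def to_bitarray(filtered_points: list[set[int]], point_count: int) -> list[list[bool]]:
--     result = []
--     for s in filtered_points:
--         row = [False] * point_count
--         for p in s:
--             if 0 <= p < point_count:
--                 row[p] = True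
--         result.append(row)
--     return result
-- ===== Notes on version B (the rewrite author's own statement) =====
-- stated objective: faster
-- what changed: B scatters True into pre-allocated all-False rows by iterating over each set's members with a bounds check, instead of A's gather that runs a Python-level membership test for every cell of the range(point_count) grid.
import Mathlib
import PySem

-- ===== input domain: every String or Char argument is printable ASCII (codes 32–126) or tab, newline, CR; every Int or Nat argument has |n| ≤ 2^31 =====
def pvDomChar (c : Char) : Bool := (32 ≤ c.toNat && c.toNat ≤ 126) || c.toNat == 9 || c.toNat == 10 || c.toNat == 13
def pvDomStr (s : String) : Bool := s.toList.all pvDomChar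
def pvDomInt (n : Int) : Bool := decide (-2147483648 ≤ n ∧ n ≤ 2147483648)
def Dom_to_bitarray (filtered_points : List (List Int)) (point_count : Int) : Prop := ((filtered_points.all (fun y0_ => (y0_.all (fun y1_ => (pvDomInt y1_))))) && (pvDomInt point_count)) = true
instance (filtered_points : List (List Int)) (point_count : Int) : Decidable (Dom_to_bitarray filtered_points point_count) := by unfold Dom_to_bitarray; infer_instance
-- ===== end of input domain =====

-- B scatters each set's members into a pre-allocated False row (with a natural bounds check)
-- instead of A's per-cell membership gather; same result, different traversal (objective: alternative).

-- ===== PORT A =====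
-- fp[line_idx] is always in range here, so pyGetD with default [] is exact.
def to_bitarray (filtered_points : List (List Int)) (point_count : Int) : List (List Bool) :=
  (PySem.List.pyRange 0 filtered_points.length 1).map (fun line_idx =>
    (PySem.List.pyRange 0 point_count 1).map (fun point_idx =>
      if (PySem.List.pyGetD filtered_points line_idx []).contains point_idx then true else false))

-- ===== PORT B =====
def scatterRow (s : List Int) (point_count : Int) : List Bool :=
  s.foldl (fun row p => if 0 ≤ p ∧ p < point_count then row.set p.toNat true else row)
    (List.replicate point_count.toNat false)

def to_bitarray_alt (filtered_points : List (List Int)) (point_count : Int) : List (List Bool) :=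
  filtered_points.map (fun s => scatterRow s point_count)

-- ===== PRECONDITION & SPEC =====
def Spec_to_bitarray (filtered_points : List (List Int)) (point_count : Int) (out : List (List Bool)) : Prop := out = to_bitarray_alt filtered_points point_count
instance (filtered_points : List (List Int)) (point_count : Int) (out : List (List Bool)) : Decidable (Spec_to_bitarray filtered_points point_count out) := by unfold Spec_to_bitarray; infer_instance

-- ===== CLAIM (what is proved, stated in full; the proofs are below) =====
def Claim_equal_to_bitarray : Prop := ∀ (filtered_points : List (List Int)) (point_count : Int), Dom_to_bitarray filtered_points point_count → Spec_to_bitarray filtered_points point_count (to_bitarray filtered_points point_count)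

-- ===== LEMMAS AND PROOFS =====

theorem scatter_fold_get? (s : List Int) (n : Int) (j : Nat) :
    ∀ (row : List Bool), row.length = n.toNat →
    (s.foldl (fun row p => if 0 ≤ p ∧ p < n then row.set p.toNat true else row) row)[j]?
      = (row[j]?).map (fun b => b || s.contains (j : Int)) := by
  induction s with
  | nil => intro row _; cases h : row[j]? <;> simp [h]
  | cons p s ih =>
    intro row hlen
    simp only [List.foldl_cons]
    by_cases hp : 0 ≤ p ∧ p < n
    · rw [if_pos hp, ih _ (by simp [hlen])]
      by_cases hj : j < row.length
      · by_cases hpe : p.toNat = j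
        · have hpj : (p == (j : Int)) = true := by
            simp only [beq_iff_eq]; omega
          have hje : ((j : Int) = p) := by omega
          simp [List.getElem?_set, hpe, hj, hje]
        · have hne : ¬((j : Int) = p) := by omega
          simp [List.getElem?_set, hpe, hne]
      · have h1 : row[j]? = none := by
          rw [List.getElem?_eq_none]; omega
        have h2 : (row.set p.toNat true)[j]? = none := by
          rw [List.getElem?_eq_none]; simp; omega
        simp [h1, h2]
    · rw [if_neg hp, ih _ hlen]
      by_cases hpe : p = (j : Int)
      · have hje : row.length ≤ j := by omega
        have h1 : row[j]? = none := by rw [List.getElem?_eq_none]; omega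
        simp [h1]
      · have hne : ¬((j : Int) = p) := fun h => hpe h.symm
        simp [hne]

theorem row_eq (s : List Int) (n : Int) :
    (PySem.List.pyRange 0 n 1).map (fun pi => if s.contains pi then true else false)
      = scatterRow s n := by
  apply List.ext_getElem?
  intro j
  unfold scatterRow
  rw [scatter_fold_get? s n j _ (by simp)]
  by_cases hj : j < n.toNat
  · have hr : (PySem.List.pyRange 0 n 1)[j]? = some (0 + (j : Int)) := by
      rw [PySem.List.getElem?_pyRange_one]
      simp [hj]
    rw [List.getElem?_map, hr]
    rw [List.getElem?_replicate]
    simp [hj]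
  · have hr : (PySem.List.pyRange 0 n 1)[j]? = none := by
      rw [List.getElem?_eq_none]
      simp [PySem.List.length_pyRange_one]; omega
    rw [List.getElem?_map, hr, List.getElem?_replicate]
    simp [hj]

-- ===== VERDICT (by name: the statement is the Claim_ definition above) =====
theorem to_bitarray_spec : Claim_equal_to_bitarray := by
  intro fp n _
  show to_bitarray fp n = to_bitarray_alt fp n
  unfold to_bitarray to_bitarray_alt
  have hma := PySem.List.map_pyGetD_pyRange_zero (xs := fp) (d := ([] : List Int))
  simp only [PySem.List.len_eq] at hma
  conv_rhs => rw [← hma]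
  rw [List.map_map]
  refine List.map_congr_left (fun li _ => ?_)
  simpa [Function.comp] using row_eq (PySem.List.pyGetD fp li []) n
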